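-- pv_equiv track=rewrite | github.com/rf-iasys/OEIS | OEIS_A003945.py | A003945
-- ===== SOURCE A (Python) =====
-- def A003945(n):
--     marked = []
--     current = 1
--     k = 1
--
--     while len(marked) < n:
--         marked.append(k)
--         k += k + current//k
--         current += current - 1
--
--     return marked
-- ===== SOURCE B (Python) =====
-- def A003945(n):
--     if n <= 0:
--         return []
--     return [1] + [3 << i for i in range(n - 1)]
-- ===== Notes on version B (the rewrite author's own statement) =====
-- stated objective: simpler
-- what changed: A's while-loop bookkeeping (current stays 1, so k doubles after the first step) is replaced by the closed form [1] + [3*2^i for i in range(n-1)].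
import Mathlib
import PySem

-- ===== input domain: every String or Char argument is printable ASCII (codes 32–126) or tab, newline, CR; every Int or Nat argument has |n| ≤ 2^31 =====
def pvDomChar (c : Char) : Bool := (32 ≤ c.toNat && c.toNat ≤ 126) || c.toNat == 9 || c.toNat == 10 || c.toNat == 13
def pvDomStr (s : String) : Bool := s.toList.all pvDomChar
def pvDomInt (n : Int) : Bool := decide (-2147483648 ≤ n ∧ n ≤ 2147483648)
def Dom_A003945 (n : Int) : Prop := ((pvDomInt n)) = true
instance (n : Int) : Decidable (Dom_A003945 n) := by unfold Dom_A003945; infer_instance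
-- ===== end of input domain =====

-- B replaces A's while-loop bookkeeping (current stays 1, k doubles after the first step)
-- by the closed form [1] ++ [3*2^i for i in range(n-1)]; objective: simpler.

-- ===== PORT A =====
-- while len(marked) < n: marked.append(k); k += k + current//k; current += current - 1
def A003945Loop (n : Int) (marked : List Int) (current k : Int) : List Int :=
  if _h : (marked.length : Int) < n then
    A003945Loop n (marked ++ [k]) (current + (current - 1)) (k + (k + PySem.Int.floordiv current k))
  else marked
termination_by (n - marked.length).toNat
decreasing_by simp; omega

def A003945 (n : Int) : List Int := A003945Loop n [] 1 1

-- ===== PORT B =====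
def A003945_alt (n : Int) : List Int :=
  if n ≤ 0 then []
  else ([1] : List Int) ++ (List.range (n - 1).toNat).map (fun (i : Nat) => (3 : Int) <<< (i : Int))

-- ===== PRECONDITION & SPEC =====
def Spec_A003945 (n : Int) (out : List Int) : Prop := out = A003945_alt n
instance (n : Int) (out : List Int) : Decidable (Spec_A003945 n out) := by unfold Spec_A003945; infer_instance

-- ===== CLAIM (what is proved, stated in full; the proofs are below) =====
def Claim_equal_A003945 : Prop := ∀ (n : Int), Dom_A003945 n → Spec_A003945 n (A003945 n)

-- ===== LEMMAS AND PROOFS =====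

-- Once k ≥ 3 and current = 1, each iteration appends k and doubles it (1 // k = 0).
theorem A003945Loop_closed (c : Nat) : ∀ (n : Int) (marked : List Int) (k : Int),
    3 ≤ k → (n - marked.length).toNat = c →
    A003945Loop n marked 1 k = marked ++ (List.range c).map (fun i => k * 2 ^ i) := by
  induction c with
  | zero =>
      intro n marked k hk hc
      rw [A003945Loop]
      have : ¬ ((marked.length : Int) < n) := by omega
      simp [this]
  | succ c ih =>
      intro n marked k hk hc
      rw [A003945Loop]
      have hlt : (marked.length : Int) < n := by omega
      have hdiv : PySem.Int.floordiv 1 k = 0 := by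
        rw [PySem.Int.floordiv_eq_iff_of_pos (by omega)]; omega
      simp only [hlt, dif_pos, hdiv]
      have h2 : (1 : Int) + (1 - 1) = 1 := by ring
      have h3 : k + (k + 0) = 2 * k := by ring
      rw [h2, h3, ih n (marked ++ [k]) (2 * k) (by omega) (by simp; omega)]
      rw [List.range_succ_eq_map]
      simp [List.map_map, Function.comp, mul_comm, mul_assoc, pow_succ]

-- ===== VERDICT (by name: the statement is the Claim_ definition above) =====
theorem A003945_spec : Claim_equal_A003945 := by
  intro n _
  unfold Spec_A003945 A003945 A003945_alt
  by_cases hn : n ≤ 0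
  · rw [A003945Loop]
    have : ¬ ((([] : List Int).length : Int) < n) := by simp; omega
    simp [hn]
  · rw [A003945Loop]
    have hlt : ((([] : List Int).length : Int) < n) := by simp; omega
    simp only [hlt, dif_pos]
    have hdiv : PySem.Int.floordiv 1 1 = 1 := by
      rw [PySem.Int.floordiv_eq_iff_of_pos (by omega)]; omega
    rw [hdiv]
    norm_num
    rw [A003945Loop_closed (n - 1).toNat n [1] 3 (by omega) (by simp)]
    rw [if_neg hn]
    rw [show (n - 1).toNat = n.toNat - 1 by omega]
    exact congrArg _ (List.map_congr_left fun i _ => by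
      rw [Int.shiftLeft_eq_mul_pow]; push_cast; ring)
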